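-- pv_equiv track=rewrite | github.com/alsdk3586/study-algorithm | 9월/20210905/정충일/1.직업군 추천하기.py | solution
-- ===== SOURCE A (Python) =====
-- def solution(table, languages, preference):
--     answer = ''
--     s = []
--     for i in table:
--         tables = i.split(" ")
--         index_l = 0
--         score = 0
--         for l in languages:
--             if l in tables:
--                 score += preference[index_l] * (6 - tables.index(l))
--             index_l +=1
--         s.append(score)
--     m = max(s)
--     if s.count(m) == 1:
--         return table[s.index(m)].split(' ')[0]
--     else:
--         l = []
--         n = -1
--         for i in range(s.count(m)):
--             n = s.index(m, n + 1)
--             l.append(table[n].split(' ')[0])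
--         l.sort()
--         return l[0]
-- ===== SOURCE B (Python) =====
-- def solution(table, languages, preference):
--     def entry(row):
--         parts = row.split(' ')
--         score = 0
--         for i, l in enumerate(languages):
--             if l in parts:
--                 score += preference[i] * (6 - parts.index(l))
--         return parts[0], score
--     best_name, best_score = entry(table[0])
--     for row in table[1:]:
--         name, score = entry(row)
--         if score > best_score or (score == best_score and name < best_name):
--             best_name, best_score = name, score
--     return best_name
-- ===== Notes on version B (the rewrite author's own statement) =====
-- stated objective: simpler
-- what changed: Replaces A's score-list plus max/count/index/second-indexing-loop/sort tie-break machinery with a single selection pass that keeps one best (name, score) candidate seeded from the first row, updating on strictly greater score or on equal score with lexicographically smaller name.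
import Mathlib
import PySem

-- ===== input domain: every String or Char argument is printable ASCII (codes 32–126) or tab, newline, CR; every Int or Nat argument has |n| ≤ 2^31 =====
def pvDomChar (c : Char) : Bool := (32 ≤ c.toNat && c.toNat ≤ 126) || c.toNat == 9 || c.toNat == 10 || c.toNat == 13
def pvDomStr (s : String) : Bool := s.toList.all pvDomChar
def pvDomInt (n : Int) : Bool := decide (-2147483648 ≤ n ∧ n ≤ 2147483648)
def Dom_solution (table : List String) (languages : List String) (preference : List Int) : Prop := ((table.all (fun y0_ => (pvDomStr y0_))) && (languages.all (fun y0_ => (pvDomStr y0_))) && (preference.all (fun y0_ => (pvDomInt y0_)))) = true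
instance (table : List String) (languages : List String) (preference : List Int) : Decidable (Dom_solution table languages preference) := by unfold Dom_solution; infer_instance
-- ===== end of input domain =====

-- B replaces A's score list + max/count/index/sort tie-break machinery by a single
-- best-candidate selection pass (objective: simpler); equal return value proved on Pre_.


-- ===== PORT A =====
-- list.index(v, start) for a nonnegative start: first index ≥ start holding v (none = ValueError)
def pyIndexFrom? {α : Type} [BEq α] (xs : List α) (v : α) (start : Nat) : Option Nat :=
  (PySem.List.index? (xs.drop start) v).map (· + start)

-- the inner 'for l in languages' loop body of A; state = (index_l, score); none = IndexError
def aStep (preference : List Int) (tables : List String) (acc : Option (Int × Int)) (l : String) : Option (Int × Int) :=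
  match acc with
  | none => none
  | some (index_l, score) =>
    if tables.contains l then
      match PySem.List.pyGet? preference index_l, PySem.List.index? tables l with
      | some p, some idx => some (index_l + 1, score + p * (6 - (idx : Int)))
      | _, _ => none
    else some (index_l + 1, score)

-- one row's score in A (tables = i.split(" "))
def aRowScore (languages : List String) (preference : List Int) (tables : List String) : Option Int :=
  (languages.foldl (aStep preference tables) (some ((0 : Int), (0 : Int)))).map (·.2)

def solution (table : List String) (languages : List String) (preference : List Int) : String :=
  -- sep " " is a nonempty literal, so Str.split? is always some; .getD [] never fires
  -- s = the list of row scores built by A's first loop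
  match table.foldl
    (fun acc i =>
      match acc, aRowScore languages preference ((PySem.Str.split? i " ").getD []) with
      | some s, some sc => some (s ++ [sc])
      | _, _ => none) (some []) with
  | none => ""          -- preference[index_l] raised IndexError; excluded by Pre_
  | some s =>
    match PySem.List.max? s (fun x => x) with
    | none => ""        -- max([]) ValueError on empty table; excluded by Pre_
    | some m =>
      if PySem.List.count s m = 1 then
        match PySem.List.index? s m with
        | some i => PySem.List.pyGetD ((PySem.Str.split? (PySem.List.pyGetD table (i : Int) "") " ").getD []) 0 ""
        | none => ""    -- unreachable: m ∈ s
      else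
        -- (n, l) state of the tie-collecting loop, then l.sort(); l[0]
        PySem.List.pyGetD (PySem.List.sorted
          ((PySem.List.pyRange 0 (PySem.List.count s m : Int)).foldl
            (fun (st : Int × List String) _ =>
              match pyIndexFrom? s m (st.1 + 1).toNat with
              | some k => ((k : Int), st.2 ++ [PySem.List.pyGetD ((PySem.Str.split? (PySem.List.pyGetD table (k : Int) "") " ").getD []) 0 ""])
              | none => st)   -- unreachable: count s m occurrences exist
            ((-1 : Int), ([] : List String))).2 (fun x => x)) 0 ""

-- ===== PORT B =====
-- the 'for i, l in enumerate(languages)' loop body of B; state = score; none = IndexError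
def bStep (preference : List Int) (parts : List String) (acc : Option Int) (p : String × Nat) : Option Int :=
  match acc with
  | none => none
  | some score =>
    if parts.contains p.1 then
      match PySem.List.pyGet? preference (p.2 : Int), PySem.List.index? parts p.1 with
      | some pr, some idx => some (score + pr * (6 - (idx : Int)))
      | _, _ => none
    else some score

-- B's entry(row) = (name, score)
def bEntry (languages : List String) (preference : List Int) (row : String) : Option (String × Int) :=
  let parts := (PySem.Str.split? row " ").getD []   -- sep " " ≠ "": split? is always some
  (languages.zipIdx.foldl (bStep preference parts) (some (0 : Int))).map
    (fun sc => (PySem.List.pyGetD parts 0 "", sc))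

def solution_alt (table : List String) (languages : List String) (preference : List Int) : String :=
  match table with
  | [] => ""            -- table[0] raises IndexError; excluded by Pre_
  | r0 :: rest =>
    match bEntry languages preference r0 with
    | none => ""        -- preference[i] raised; excluded by Pre_
    | some best0 =>
      match rest.foldl
        (fun acc row =>
          match acc with
          | none => none
          | some best =>
            match bEntry languages preference row with
            | none => none
            | some p =>
              some (if best.2 < p.2 || (p.2 == best.2 && decide (p.1 < best.1)) then p else best))
        (some best0) with
      | some best => best.1
      | none => ""      -- preference[i] raised; excluded by Pre_

-- ===== PRECONDITION & SPEC =====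
-- Pre_ excludes exactly the inputs on which A raises: an empty table (max([]) is a ValueError)
-- and rows containing a language whose position is out of range in preference (IndexError).
def Pre_solution (table : List String) (languages : List String) (preference : List Int) : Prop :=
  table ≠ [] ∧ ∀ row ∈ table, ∀ p ∈ languages.zipIdx,
    ((PySem.Str.split? row " ").getD []).contains p.1 = true → p.2 < preference.length
instance (table : List String) (languages : List String) (preference : List Int) : Decidable (Pre_solution table languages preference) := by unfold Pre_solution; infer_instance

def pvWitness_solution : List String × List String × List Int :=
  (["java backend junior pizza 150", "python frontend senior chicken 210"], ["python", "java"], [5, 2])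

def Spec_solution (table : List String) (languages : List String) (preference : List Int) (out : String) : Prop := out = solution_alt table languages preference
instance (table : List String) (languages : List String) (preference : List Int) (out : String) : Decidable (Spec_solution table languages preference out) := by unfold Spec_solution; infer_instance

-- ===== CLAIM (what is proved, stated in full; the proofs are below) =====
def Claim_equal_solution : Prop := ∀ (table : List String) (languages : List String) (preference : List Int), Dom_solution table languages preference → Pre_solution table languages preference → Spec_solution table languages preference (solution table languages preference)

-- ===== LEMMAS AND PROOFS =====

-- proof-side abbreviations
def partsOf (row : String) : List String := (PySem.Str.split? row " ").getD []
def nameOf (row : String) : String := PySem.List.pyGetD (partsOf row) 0 ""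
def pureStep (preference : List Int) (tables : List String) (sc : Int) (p : String × Nat) : Int :=
  if tables.contains p.1 then sc + preference.getD p.2 0 * (6 - (List.idxOf p.1 tables : Int)) else sc
def scoreV (languages : List String) (preference : List Int) (row : String) : Int :=
  (languages.zipIdx).foldl (pureStep preference (partsOf row)) 0
def selStep (best p : String × Int) : String × Int :=
  if best.2 < p.2 || (p.2 == best.2 && decide (p.1 < best.1)) then p else best
-- the names whose aligned score equals m, in order (the tie candidates)
def occ : List String → List Int → Int → List String
  | n :: ns, x :: xs, m => if x = m then n :: occ ns xs m else occ ns xs m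
  | _, _, _ => []

theorem idxOf?_of_mem {xs : List String} {v : String} (h : v ∈ xs) :
    List.idxOf? v xs = some (List.idxOf v xs) := by
  induction xs with
  | nil => simp at h
  | cons x t ih =>
    by_cases hx : x = v
    · subst hx; simp [List.idxOf?_cons]
    · have hv : v ∈ t := by rcases List.mem_cons.mp h with h'|h'; exact absurd h'.symm hx; exact h'
      simp [List.idxOf?_cons, hx, ih hv, beq_iff_eq]


theorem occ_eq_nil {names : List String} {s : List Int} {m : Int}
    (h : ¬ m ∈ s) : occ names s m = [] := by
  induction names generalizing s with
  | nil => cases s <;> simp [occ]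
  | cons n ns ih =>
    cases s with
    | nil => simp [occ]
    | cons x xs =>
      simp only [List.mem_cons, not_or] at h
      simp [occ, Ne.symm h.1, ih h.2]

theorem mem_occ {names : List String} {s : List Int} {m : Int} {y : String}
    (hlen : names.length = s.length) :
    y ∈ occ names s m ↔ ∃ (j : Nat) (h1 : j < names.length) (h2 : j < s.length), names[j] = y ∧ s[j] = m := by
  induction names generalizing s with
  | nil => cases s <;> simp [occ]
  | cons n ns ih =>
    cases s with
    | nil => simp at hlen
    | cons x xs =>
      simp only [List.length_cons, Nat.add_right_cancel_iff] at hlen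
      have step : occ (n :: ns) (x :: xs) m = if x = m then n :: occ ns xs m else occ ns xs m := by
        simp [occ]
      rw [step]
      constructor
      · intro hy
        by_cases hx : x = m
        · rw [if_pos hx] at hy
          rcases List.mem_cons.mp hy with h | h
          · exact ⟨0, by simp, by simp, by simp [h.symm], by simp [hx]⟩
          · obtain ⟨j, h1, h2, hn, hs⟩ := (ih hlen).mp h
            exact ⟨j+1, by simpa using h1, by simpa using h2, by simpa using hn, by simpa using hs⟩
        · rw [if_neg hx] at hy
          obtain ⟨j, h1, h2, hn, hs⟩ := (ih hlen).mp hy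
          exact ⟨j+1, by simpa using h1, by simpa using h2, by simpa using hn, by simpa using hs⟩
      · rintro ⟨j, h1, h2, hn, hs⟩
        cases j with
        | zero =>
          simp only [List.getElem_cons_zero] at hn hs
          rw [if_pos hs, ← hn]
          exact List.mem_cons_self
        | succ j =>
          simp only [List.getElem_cons_succ] at hn hs
          have hmem : y ∈ occ ns xs m := (ih hlen).mpr ⟨j, by simpa using h1, by simpa using h2, hn, hs⟩
          by_cases hx : x = m
          · rw [if_pos hx]; exact List.mem_cons_of_mem _ hmem
          · rw [if_neg hx]; exact hmem

theorem occ_idx {names : List String} {s : List Int} {m : Int} {r : Nat}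
    (hlen : names.length = s.length) (h : PySem.List.index? s m = some r) :
    ∃ (h1 : r < s.length) (h2 : r < names.length),
      occ names s m = names[r] :: occ (names.drop (r + 1)) (s.drop (r + 1)) m ∧
      (s.drop (r + 1)).count m = s.count m - 1 ∧ s[r] = m := by
  induction s generalizing names r with
  | nil => simp [PySem.List.index?, List.idxOf?] at h
  | cons x xs ih =>
    cases names with
    | nil => simp at hlen
    | cons n ns =>
      simp only [List.length_cons, Nat.add_right_cancel_iff] at hlen
      have step : occ (n :: ns) (x :: xs) m = if x = m then n :: occ ns xs m else occ ns xs m := by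
        simp [occ]
      by_cases hx : x = m
      · have : r = 0 := by
          rw [hx, PySem.List.index?_cons_self] at h
          simpa using h.symm
        subst this
        refine ⟨by simp, by simp, ?_, ?_, by simpa using hx⟩
        · rw [step, if_pos hx]; simp
        · simp [hx]
      · rw [PySem.List.index?_cons_of_ne xs hx] at h
        rcases Option.map_eq_some_iff.mp h with ⟨r', hr', hrr⟩
        obtain ⟨h1, h2, hocc, hcnt, hval⟩ := ih hlen hr'
        subst hrr
        refine ⟨by simpa using Nat.succ_lt_succ h1, by simpa using Nat.succ_lt_succ h2, ?_, ?_, by simpa using hval⟩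
        · rw [step, if_neg hx, hocc]
          simp
        · simp only [List.drop_succ_cons] at *
          rw [hcnt]
          simp [hx]

theorem foldl_const_body {β State : Type} (l : List β) (g : State → State) (init : State) :
    l.foldl (fun st _ => g st) init = g^[l.length] init := by
  induction l generalizing init with
  | nil => simp
  | cons x t ih => simp [ih, Function.iterate_succ_apply]

theorem aFold_some (preference : List Int) (tables : List String) (langs : List String)
    (j : Nat) (sc : Int)
    (hc : ∀ p ∈ langs.zipIdx j, tables.contains p.1 = true → p.2 < preference.length) :
    langs.foldl (aStep preference tables) (some ((j : Int), sc)) =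
      some (((j + langs.length : Nat) : Int), (langs.zipIdx j).foldl (pureStep preference tables) sc) := by
  induction langs generalizing j sc with
  | nil => simp
  | cons l t ih =>
    rw [List.zipIdx_cons] at hc ⊢
    simp only [List.foldl_cons]
    have hnext : ∀ p ∈ t.zipIdx (j+1), tables.contains p.1 = true → p.2 < preference.length :=
      fun p hp => hc p (by simp [hp])
    by_cases hl : tables.contains l = true
    · have hj : j < preference.length := hc (l, j) (by simp) hl
      have hmem : l ∈ tables := by simpa using hl
      have hpg : PySem.List.pyGet? preference ((j : Nat) : Int) = some (preference.getD j 0) := by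
        rw [PySem.List.pyGet?_natCast, List.getElem?_eq_getElem hj, List.getD_eq_getElem _ _ hj]
      have hidx : PySem.List.index? tables l = some (List.idxOf l tables) := by
        rw [PySem.List.index?_eq_idxOf?]; exact idxOf?_of_mem hmem
      have hstep : aStep preference tables (some ((j:Int), sc)) l =
          some ((((j+1 : Nat)) : Int), pureStep preference tables sc (l, j)) := by
        simp only [aStep, hl, if_true, hpg, hidx, pureStep]
        push_cast
        ring_nf
      rw [hstep, ih (j+1) _ hnext]
      have hlen : j + 1 + t.length = j + (t.length + 1) := by omega
      simp [hlen]
    · have hstep : aStep preference tables (some ((j:Int), sc)) l =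
          some ((((j+1 : Nat)) : Int), pureStep preference tables sc (l, j)) := by
        simp only [aStep, hl, pureStep]
        push_cast
        ring_nf
      rw [hstep, ih (j+1) _ hnext]
      have hlen : j + 1 + t.length = j + (t.length + 1) := by omega
      simp [hlen]

theorem bFold_some (preference : List Int) (parts : List String) (L : List (String × Nat)) (sc : Int)
    (hc : ∀ p ∈ L, parts.contains p.1 = true → p.2 < preference.length) :
    L.foldl (bStep preference parts) (some sc) = some (L.foldl (pureStep preference parts) sc) := by
  induction L generalizing sc with
  | nil => simp
  | cons p t ih =>
    simp only [List.foldl_cons]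
    by_cases hl : parts.contains p.1 = true
    · have hj : p.2 < preference.length := hc p (by simp) hl
      have hmem : p.1 ∈ parts := by simpa using hl
      have hpg : PySem.List.pyGet? preference ((p.2 : Nat) : Int) = some (preference.getD p.2 0) := by
        rw [PySem.List.pyGet?_natCast, List.getElem?_eq_getElem hj, List.getD_eq_getElem _ _ hj]
      have hidx : PySem.List.index? parts p.1 = some (List.idxOf p.1 parts) := by
        rw [PySem.List.index?_eq_idxOf?]; exact idxOf?_of_mem hmem
      have hstep : bStep preference parts (some sc) p = some (pureStep preference parts sc p) := by
        simp only [bStep, hl, if_true, hpg, hidx, pureStep]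
      rw [hstep, ih _ (fun q hq => hc q (by simp [hq]))]
    · have hni : p.1 ∉ parts := by simpa using hl
      have hstep : bStep preference parts (some sc) p = some (pureStep preference parts sc p) := by
        simp [bStep, pureStep, hni]
      rw [hstep, ih _ (fun q hq => hc q (by simp [hq]))]

theorem sel_char (ps : List (String × Int)) (b : String × Int) :
    ps.foldl selStep b ∈ b :: ps ∧
    (∀ q ∈ b :: ps, q.2 ≤ (ps.foldl selStep b).2) ∧
    (∀ q ∈ b :: ps, q.2 = (ps.foldl selStep b).2 → (ps.foldl selStep b).1 ≤ q.1) := by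
  induction ps generalizing b with
  | nil => exact ⟨by simp, by simp, by simp⟩
  | cons p t ih =>
    simp only [List.foldl_cons]
    obtain ⟨hmem, hmax, hmin⟩ := ih (selStep b p)
    by_cases hcond : (b.2 < p.2 || (p.2 == b.2 && decide (p.1 < b.1))) = true
    · have hs : selStep b p = p := by unfold selStep; rw [if_pos hcond]
      rw [hs] at hmem hmax hmin ⊢
      have hbp : b.2 ≤ p.2 := by
        rcases Bool.or_eq_true_iff.mp hcond with h | h
        · exact le_of_lt (by simpa using h)
        · exact le_of_eq (beq_iff_eq.mp (Bool.and_eq_true_iff.mp h).1).symm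
      have hpr : p.2 ≤ (t.foldl selStep p).2 := hmax _ (by simp)
      refine ⟨List.mem_cons_of_mem _ hmem, ?_, ?_⟩
      · intro q hq
        rcases List.mem_cons.mp hq with rfl | hq'
        · exact le_trans hbp hpr
        · rcases List.mem_cons.mp hq' with rfl | hq''
          · exact hpr
          · exact hmax _ (List.mem_cons_of_mem _ hq'')
      · intro q hq hq2
        rcases List.mem_cons.mp hq with rfl | hq'
        · -- q = b and b.2 = result.2 : then p.2 = b.2 and p.1 < b.1
          have hpb2 : p.2 = (t.foldl selStep p).2 := le_antisymm hpr (hq2 ▸ hbp)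
          have hlt : p.1 < q.1 := by
            rcases Bool.or_eq_true_iff.mp hcond with h | h
            · exfalso
              have h1 : q.2 < p.2 := by simpa using h
              have h2 : q.2 = (t.foldl selStep p).2 := hq2
              omega
            · simpa using of_decide_eq_true (Bool.and_eq_true_iff.mp h).2
          exact le_trans (hmin _ (by simp) hpb2) (le_of_lt hlt)
        · rcases List.mem_cons.mp hq' with rfl | hq''
          · exact hmin _ (by simp) hq2
          · exact hmin _ (List.mem_cons_of_mem _ hq'') hq2
    · have hs : selStep b p = b := by unfold selStep; rw [if_neg hcond]
      rw [hs] at hmem hmax hmin ⊢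
      simp only [Bool.or_eq_true_iff, not_or, Bool.and_eq_true_iff, not_and] at hcond
      have hpb : p.2 ≤ b.2 := by
        have h1 : ¬ b.2 < p.2 := by simpa using hcond.1
        omega
      have hbr : b.2 ≤ (t.foldl selStep b).2 := hmax _ (by simp)
      refine ⟨?_, ?_, ?_⟩
      · rcases List.mem_cons.mp hmem with h | h
        · simp [h]
        · exact List.mem_cons_of_mem _ (List.mem_cons_of_mem _ h)
      · intro q hq
        rcases List.mem_cons.mp hq with rfl | hq'
        · exact hbr
        · rcases List.mem_cons.mp hq' with rfl | hq''
          · exact le_trans hpb hbr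
          · exact hmax _ (List.mem_cons_of_mem _ hq'')
      · intro q hq hq2
        rcases List.mem_cons.mp hq with rfl | hq'
        · exact hmin _ (by simp) hq2
        · rcases List.mem_cons.mp hq' with rfl | hq''
          · -- q = p and p.2 = result.2 : then p.2 = b.2 and ¬(p.1 < b.1)
            have hb2 : b.2 = (t.foldl selStep b).2 := by omega
            have hqb2 : q.2 = b.2 := by omega
            have hnlt : ¬ q.1 < b.1 := by
              intro hlt
              have := hcond.2 (beq_iff_eq.mpr hqb2)
              exact this (decide_eq_true hlt)
            exact le_trans (hmin _ (by simp) hb2) (le_of_not_gt hnlt)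
          · exact hmin _ (List.mem_cons_of_mem _ hq'') hq2

theorem collect (table : List String) (s : List Int) (m : Int)
    (hlen : s.length = table.length) :
    ∀ (c : Nat) (start : Nat) (n : Int) (acc : List String),
      (n + 1).toNat = start →
      (s.drop start).count m = c →
      ∃ n', (fun (st : Int × List String) =>
          match pyIndexFrom? s m (st.1 + 1).toNat with
          | some k => ((k : Int), st.2 ++ [PySem.List.pyGetD ((PySem.Str.split? (PySem.List.pyGetD table (k : Int) "") " ").getD []) 0 ""])
          | none => st)^[c] (n, acc) =
        (n', acc ++ occ ((table.map nameOf).drop start) (s.drop start) m) := by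
  intro c
  induction c with
  | zero =>
    intro start n acc hst hcnt
    refine ⟨n, ?_⟩
    rw [Function.iterate_zero_apply]
    have : ¬ m ∈ s.drop start := by
      intro hm
      have := List.count_pos_iff.mpr hm
      omega
    rw [occ_eq_nil this]
    simp
  | succ c ih =>
    intro start n acc hst hcnt
    have hmem : m ∈ s.drop start := by
      by_contra hm
      have : (s.drop start).count m = 0 := by
        simpa using List.count_eq_zero.mpr hm
      omega
    obtain ⟨r, hr⟩ := Option.isSome_iff_exists.mp ((PySem.List.index?_isSome_iff _ _).mpr hmem)
    have hdlen : ((table.map nameOf).drop start).length = (s.drop start).length := by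
      simp [hlen]
    obtain ⟨h1, h2, hocc, hcnt', hval⟩ := occ_idx hdlen hr
    have hk : start + r < s.length := by
      have := List.length_drop (l := s) (i := start)
      omega
    have hkt : start + r < table.length := by omega
    rw [Function.iterate_succ_apply]
    have hstep : (match pyIndexFrom? s m (n + 1).toNat with
        | some k => ((k : Int), acc ++ [PySem.List.pyGetD ((PySem.Str.split? (PySem.List.pyGetD table (k : Int) "") " ").getD []) 0 ""])
        | none => (n, acc)) =
        (((start + r : Nat) : Int), acc ++ [(table.map nameOf)[start + r]'(by simpa using hkt)]) := by
      rw [show pyIndexFrom? s m (n+1).toNat = some (r + start) by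
        rw [pyIndexFrom?, hst, hr]; rfl]
      have : PySem.List.pyGetD table ((r + start : Nat) : Int) "" = table[start + r]'hkt := by
        rw [PySem.List.pyGetD_natCast, List.getD_eq_getElem _ _ (by omega : r + start < table.length)]
        congr 1
        omega
      simp only [this]
      rw [List.getElem_map]
      simp [nameOf, partsOf, Nat.add_comm start r]
    rw [hstep]
    have hst2 : (((start + r : Nat) : Int) + 1).toNat = start + r + 1 := by
      push_cast
      omega
    have hcnt2 : (s.drop (start + r + 1)).count m = c := by
      have h := hcnt'
      rw [List.drop_drop] at h
      rw [Nat.add_assoc]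
      omega
    obtain ⟨n', hn'⟩ := ih (start + r + 1) ((start + r : Nat) : Int)
      (acc ++ [(table.map nameOf)[start + r]'(by simpa using hkt)]) hst2 hcnt2
    refine ⟨n', ?_⟩
    rw [hn', hocc]
    congr 1
    have e1 : ((table.map nameOf).drop start)[r]'h2 = (table.map nameOf)[start + r]'(by simpa using hkt) := by
      rw [List.getElem_drop]
    have e2 : ((table.map nameOf).drop start).drop (r+1) = (table.map nameOf).drop (start + r + 1) := by
      rw [List.drop_drop, ← Nat.add_assoc]
    have e3 : (s.drop start).drop (r+1) = s.drop (start + r + 1) := by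
      rw [List.drop_drop, ← Nat.add_assoc]
    rw [e1, e2, e3]
    simp

-- the list of row scores built by A's first loop
theorem aBuild (f : String → Option Int) (g : String → Int) (table : List String) (init : List Int)
    (h : ∀ row ∈ table, f row = some (g row)) :
    table.foldl (fun acc i =>
      match acc, f i with
      | some s, some sc => some (s ++ [sc])
      | _, _ => none) (some init) = some (init ++ table.map g) := by
  induction table generalizing init with
  | nil => simp
  | cons r t ih =>
    simp only [List.foldl_cons, h r (by simp), List.map_cons]
    rw [ih (init ++ [g r]) (fun row hrow => h row (by simp [hrow]))]
    simp

-- B's selection loop over rows, with every entry defined, is the pure selStep fold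
theorem bBuild (e : String → Option (String × Int)) (g : String → String × Int) (rest : List String)
    (h : ∀ row ∈ rest, e row = some (g row)) (b0 : String × Int) :
    rest.foldl (fun acc row =>
      match acc with
      | none => none
      | some best =>
        match e row with
        | none => none
        | some p =>
          some (if best.2 < p.2 || (p.2 == best.2 && decide (p.1 < best.1)) then p else best))
      (some b0) = some ((rest.map g).foldl selStep b0) := by
  induction rest generalizing b0 with
  | nil => simp
  | cons r t ih =>
    simp only [List.foldl_cons, h r (by simp), List.map_cons]
    rw [ih (fun row hrow => h row (by simp [hrow]))]
    rfl

-- per-row agreement of the two inner loops with the pure score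
theorem rowA (languages : List String) (preference : List Int) (row : String)
    (hc : ∀ p ∈ languages.zipIdx, (partsOf row).contains p.1 = true → p.2 < preference.length) :
    aRowScore languages preference (partsOf row) = some (scoreV languages preference row) := by
  unfold aRowScore scoreV
  rw [show (some ((0 : Int), (0 : Int))) = some (((0 : Nat) : Int), (0 : Int)) by norm_num]
  rw [aFold_some preference (partsOf row) languages 0 0 hc]
  rfl

theorem rowB (languages : List String) (preference : List Int) (row : String)
    (hc : ∀ p ∈ languages.zipIdx, (partsOf row).contains p.1 = true → p.2 < preference.length) :
    bEntry languages preference row = some (nameOf row, scoreV languages preference row) := by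
  unfold bEntry
  show (Option.map (fun sc => (PySem.List.pyGetD (partsOf row) 0 "", sc))
      (List.foldl (bStep preference (partsOf row)) (some 0) languages.zipIdx)) = _
  rw [bFold_some preference (partsOf row) languages.zipIdx 0 hc]
  rfl

-- ===== VERDICT (by name: the statement is the Claim_ definition above) =====
theorem mem_occ_of_getElem {names : List String} {s : List Int} {m : Int} {y : String}
    (hlen : names.length = s.length) (j : Nat) (h1 : j < names.length) (h2 : j < s.length)
    (hn : names[j] = y) (hs : s[j] = m) : y ∈ occ names s m :=
  (mem_occ hlen).mpr ⟨j, h1, h2, hn, hs⟩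

-- ===== VERDICT (by name: the statement is the Claim_ definition above) =====
theorem solution_spec : Claim_equal_solution := by
  intro table languages preference hdom hpre
  unfold Spec_solution
  obtain ⟨hne, hrows⟩ := hpre
  have hrow : ∀ row ∈ table, ∀ p ∈ languages.zipIdx,
      (partsOf row).contains p.1 = true → p.2 < preference.length := by
    intro row hr p hp hc
    exact hrows row hr p hp (by simpa [partsOf] using hc)
  cases table with
  | nil => exact absurd rfl hne
  | cons r0 rest =>
  have hA : ∀ row ∈ r0 :: rest,
      aRowScore languages preference ((PySem.Str.split? row " ").getD []) =
        some (scoreV languages preference row) := by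
    intro row hr
    have := rowA languages preference row (hrow row hr)
    simpa [partsOf] using this
  have hB : ∀ row ∈ r0 :: rest, bEntry languages preference row =
      some (nameOf row, scoreV languages preference row) :=
    fun row hr => rowB languages preference row (hrow row hr)
  set sv : String → Int := scoreV languages preference with hsv
  set gB : String → String × Int := fun row => (nameOf row, sv row) with hgB
  -- B-side value
  have hBval : solution_alt (r0 :: rest) languages preference =
      ((rest.map gB).foldl selStep (gB r0)).1 := by
    unfold solution_alt
    dsimp only
    rw [hB r0 (by simp)]
    dsimp only
    rw [show (some (nameOf r0, sv r0)) = some (gB r0) from rfl]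
    rw [bBuild (bEntry languages preference) gB rest (fun row hr => hB row (by simp [hr])) (gB r0)]
  set s : List Int := (r0 :: rest).map sv with hs
  set N : List String := (r0 :: rest).map nameOf with hN
  have hlen : N.length = s.length := by simp [hN, hs]
  have hlenT : s.length = (r0 :: rest).length := by simp [hs]
  -- A's score list
  have hS : (r0 :: rest).foldl (fun acc i =>
      match acc, aRowScore languages preference ((PySem.Str.split? i " ").getD []) with
      | some s, some sc => some (s ++ [sc])
      | _, _ => none) (some []) = some s := by
    have := aBuild (fun i => aRowScore languages preference ((PySem.Str.split? i " ").getD []))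
      sv (r0 :: rest) [] hA
    simpa using this
  -- the maximum
  obtain ⟨m, hm⟩ : ∃ m, PySem.List.max? s (fun x => x) = some m := by
    cases hmax : PySem.List.max? s (fun x => x) with
    | none => exact absurd ((PySem.List.max?_eq_none_iff _ _).mp hmax) (by simp [hs])
    | some v => exact ⟨v, rfl⟩
  have hmmem : m ∈ s := PySem.List.max?_mem hm
  have hmmax : ∀ y ∈ s, y ≤ m := fun y hy => PySem.List.max?_isMax hm y hy
  -- A's result is a minimum of occ N s m
  have hAval : ∃ a, solution (r0 :: rest) languages preference = a ∧
      a ∈ occ N s m ∧ ∀ y ∈ occ N s m, a ≤ y := by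
    unfold solution
    rw [hS]
    dsimp only
    rw [hm]
    dsimp only
    by_cases hc1 : PySem.List.count s m = 1
    · rw [if_pos hc1]
      obtain ⟨i, hi⟩ := Option.isSome_iff_exists.mp ((PySem.List.index?_isSome_iff s m).mpr hmmem)
      rw [hi]
      dsimp only
      obtain ⟨h1, h2, hocc, hcnt', hval⟩ := occ_idx hlen hi
      have hocc0 : occ (N.drop (i + 1)) (s.drop (i + 1)) m = [] := by
        refine occ_eq_nil ?_
        rw [← List.count_pos_iff]
        rw [hcnt', ← PySem.List.count_eq, hc1]
        omega
      have hocc1 : occ N s m = [N[i]] := by rw [hocc, hocc0]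
      have hit : i < (r0 :: rest).length := by omega
      have hgd : PySem.List.pyGetD (r0 :: rest) ((i : Nat) : Int) "" = (r0 :: rest)[i] := by
        rw [PySem.List.pyGetD_natCast, List.getD_eq_getElem _ _ hit]
      refine ⟨N[i], ?_, by rw [hocc1]; exact List.mem_cons_self, by rw [hocc1]; intro y hy; rw [List.mem_singleton.mp hy]⟩
      rw [hgd]
      simp only [hN, List.getElem_map]
      rfl
    · rw [if_neg hc1]
      rw [foldl_const_body]
      have hlp : (PySem.List.pyRange 0 ((PySem.List.count s m : Nat) : Int)).length = PySem.List.count s m := by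
        rw [PySem.List.pyRange_zero_natCast]
        simp
      rw [hlp]
      obtain ⟨n', hn'⟩ := collect (r0 :: rest) s m hlenT (PySem.List.count s m) 0 (-1) []
        (by norm_num) (by rw [List.drop_zero, PySem.List.count_eq])
      rw [hn']
      simp only [List.drop_zero, List.nil_append]
      obtain ⟨iv, hiv⟩ := Option.isSome_iff_exists.mp ((PySem.List.index?_isSome_iff s m).mpr hmmem)
      obtain ⟨hv1, hv2, hoccv, -, -⟩ := occ_idx hlen hiv
      have hne2 : occ N s m ≠ [] := by rw [hoccv]; simp
      cases hsorted : PySem.List.sorted (occ N s m) (fun x => x) with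
      | nil => exact absurd ((PySem.List.sorted_eq_nil_iff _ _ _).mp hsorted) hne2
      | cons h0 t0 =>
        have hmemh0 : h0 ∈ occ N s m :=
          (PySem.List.sorted_perm (occ N s m) (fun x => x) false).subset
            (by rw [hsorted]; exact List.mem_cons_self)
        refine ⟨h0, ?_, hmemh0, PySem.List.key_head_sorted_le (occ N s m) (fun x => x) hsorted⟩
        rw [show ((0 : Int)) = ((0 : Nat) : Int) from rfl, PySem.List.pyGetD_natCast]
        rfl
  -- B's result is a minimum of occ N s m
  have hBmin : ((rest.map gB).foldl selStep (gB r0)).1 ∈ occ N s m ∧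
      ∀ y ∈ occ N s m, ((rest.map gB).foldl selStep (gB r0)).1 ≤ y := by
    obtain ⟨hmem, hmax2, hmin2⟩ := sel_char (rest.map gB) (gB r0)
    rw [← List.map_cons] at hmem hmax2 hmin2
    set r : String × Int := (rest.map gB).foldl selStep (gB r0) with hr
    have hgB1 : ∀ row, (gB row).1 = nameOf row := fun _ => rfl
    have hgB2 : ∀ row, (gB row).2 = sv row := fun _ => rfl
    have hr2 : r.2 = m := by
      obtain ⟨row, hrw, hq⟩ := List.mem_map.mp hmem
      have h1 : r.2 ≤ m := by
        have : r.2 ∈ s := by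
          rw [hs, ← hq]
          exact List.mem_map.mpr ⟨row, hrw, rfl⟩
        exact hmmax _ this
      have h2 : m ≤ r.2 := by
        obtain ⟨row', hrw', hsv'⟩ := List.mem_map.mp (hs ▸ hmmem)
        have : (gB row').2 ≤ r.2 := hmax2 _ (List.mem_map.mpr ⟨row', hrw', rfl⟩)
        rw [hgB2] at this
        omega
      omega
    obtain ⟨j, hj, hjr⟩ := List.mem_iff_getElem.mp hmem
    have hj1 : j < N.length := by simpa [hN] using (by simpa using hj : j < (r0 :: rest).length)
    have hj2 : j < s.length := by simpa [hs] using (by simpa using hj : j < (r0 :: rest).length)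
    have hj0 : j < (r0 :: rest).length := by simpa using hj
    have hNj : N[j] = r.1 := by
      simp only [hN, List.getElem_map]
      rw [show nameOf (r0 :: rest)[j] = (gB (r0 :: rest)[j]).1 from rfl]
      rw [show gB (r0 :: rest)[j] = ((r0 :: rest).map gB)[j]'(by simpa using hj0) from (List.getElem_map _).symm, hjr]
    have hsj : s[j] = m := by
      simp only [hs, List.getElem_map]
      rw [show sv (r0 :: rest)[j] = (gB (r0 :: rest)[j]).2 from rfl]
      rw [show gB (r0 :: rest)[j] = ((r0 :: rest).map gB)[j]'(by simpa using hj0) from (List.getElem_map _).symm, hjr, hr2]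
    refine ⟨mem_occ_of_getElem hlen j hj1 hj2 hNj hsj, ?_⟩
    intro y hy
    obtain ⟨k, h1, h2, hNk, hsk⟩ := (mem_occ hlen).mp hy
    have hk : k < (r0 :: rest).length := by
      rw [hN] at h1
      simpa using h1
    have hq2 : (gB (r0 :: rest)[k]).2 = r.2 := by
      rw [hgB2, hr2, ← hsk]
      simp only [hs, List.getElem_map]
    have := hmin2 (((r0 :: rest).map gB)[k]'(by simpa using hk))
      (List.getElem_mem _) (by rw [List.getElem_map]; exact hq2)
    rw [List.getElem_map] at this
    simp only [hN, List.getElem_map] at hNk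
    rw [hgB1, hNk] at this
    exact this
  obtain ⟨a, haeq, hamem, hale⟩ := hAval
  rw [haeq, hBval]
  exact le_antisymm (hale _ hBmin.1) (hBmin.2 a hamem)
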